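-- pv_equiv track=rewrite | github.com/simonetd/coaching_dev | coaching_dev/src/coaching_dev/rango_alpha.py | draw_rangoli
-- ===== SOURCE A (Python) =====
-- def draw_rangoli(size):
--     """Draw Rangoli square depending on the size asked"""
--     import string
--
--     # Alphabet
--     alpha = string.ascii_lowercase
--
--     # lignes
--     lines = []
--     for i in range(size):
--         left_part = '-'.join(alpha[size-1:i:-1])
--         full_row = left_part + (('-' if left_part else '') + alpha[i] + ('-' if left_part else '') + left_part[::-1])
--         lines.append(full_row.center(4 * size - 3, '-'))
--
--
--     return '\n'.join(lines[::-1] + lines[1:])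
-- ===== SOURCE B (Python) =====
-- def draw_rangoli(size):
--     """Draw Rangoli square depending on the size asked"""
--     import string
--
--     alpha = string.ascii_lowercase
--     w = 4 * size - 3
--     rows = []
--     for r in range(2 * size - 1):
--         d = abs(r - (size - 1))
--         letters = [alpha[size - 1 - k] for k in range(size - d)] \
--                   + [alpha[d + k + 1] for k in range(size - 1 - d)]
--         rows.append('-'.join(letters).center(w, '-'))
--     return '\n'.join(rows)
-- ===== Notes on version B (the rewrite author's own statement) =====
-- stated objective: alternative
-- what changed: B replaces A's half-build (top rows via descending alphabet slices, string-mirroring each row, then reversing and re-appending the list) by a single pass over all rows that builds each full row directly from its absolute distance to the centre row.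
-- outside the precondition, e.g. on draw_rangoli(27): A raises IndexError, B raises IndexError
import Mathlib
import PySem

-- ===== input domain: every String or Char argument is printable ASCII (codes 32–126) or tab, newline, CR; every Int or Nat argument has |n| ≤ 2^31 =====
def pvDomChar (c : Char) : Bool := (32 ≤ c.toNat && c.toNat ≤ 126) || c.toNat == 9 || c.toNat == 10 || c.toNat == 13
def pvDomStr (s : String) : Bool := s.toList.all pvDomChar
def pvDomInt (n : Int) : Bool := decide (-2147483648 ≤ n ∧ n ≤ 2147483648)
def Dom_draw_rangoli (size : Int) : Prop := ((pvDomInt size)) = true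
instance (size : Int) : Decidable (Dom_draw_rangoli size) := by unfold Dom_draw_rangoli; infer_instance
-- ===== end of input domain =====

-- B builds every row in one pass keyed on the distance from the centre row, instead of
-- A's half-build-plus-mirror via list slicing (objective: alternative decomposition).

-- shared context: string.ascii_lowercase, as a list of code points
def pvAlpha : List Char := "abcdefghijklmnopqrstuvwxyz".toList

-- '-'.join over the characters of a string (both Pythons call '-'.join on a char sequence)
def pvJoinDash (cs : List Char) : List Char := PySem.Chars.join ['-'] (cs.map (fun c => [c]))

-- s.center(w, fill): exact hand port of CPython's do_center (marg = w - len;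
-- left = marg//2 + (marg & w & 1)); PySem has no center primitive
def pvCenter (s : List Char) (w : Int) (fill : Char) : List Char :=
  if w ≤ (s.length : Int) then s
  else
    let marg : Nat := (w - (s.length : Int)).toNat
    let left : Nat := marg / 2 + (marg &&& w.toNat &&& 1)
    List.replicate left fill ++ s ++ List.replicate (marg - left) fill

-- ===== PORT A =====
-- alpha[i] is ported as pyGet? + getD: the IndexError case (size ≥ 27) is excluded by Pre_
def pvLinesA (size : Int) : List Char :=
  let lines : List (List Char) :=
    (PySem.List.pyRange 0 size 1).foldl (fun lines i =>
      let left_part : List Char :=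
        pvJoinDash ((PySem.List.slice? pvAlpha (some (size - 1)) (some i) (-1)).getD [])
      let full_row : List Char :=
        left_part ++ ((if left_part ≠ [] then ['-'] else [])
          ++ [(PySem.List.pyGet? pvAlpha i).getD ' ']
          ++ (if left_part ≠ [] then ['-'] else [])
          ++ (PySem.List.slice? left_part none none (-1)).getD [])
      lines ++ [pvCenter full_row (4 * size - 3) '-']) []
  PySem.Chars.join ['\n']
    ((PySem.List.slice? lines none none (-1)).getD [] ++ PySem.List.slice lines (some 1) none)

def draw_rangoli (size : Int) : String := String.ofList (pvLinesA size)

-- ===== PORT B =====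
def pvLinesB (size : Int) : List Char :=
  let w : Int := 4 * size - 3
  let rows : List (List Char) :=
    (PySem.List.pyRange 0 (2 * size - 1) 1).foldl (fun rows r =>
      let d : Int := |r - (size - 1)|
      let letters : List Char :=
        (PySem.List.pyRange 0 (size - d) 1).map
          (fun k => (PySem.List.pyGet? pvAlpha (size - 1 - k)).getD ' ')
        ++ (PySem.List.pyRange 0 (size - 1 - d) 1).map
          (fun k => (PySem.List.pyGet? pvAlpha (d + k + 1)).getD ' ')
      rows ++ [pvCenter (pvJoinDash letters) w '-']) []
  PySem.Chars.join ['\n'] rows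

def draw_rangoli_alt (size : Int) : String := String.ofList (pvLinesB size)

-- ===== PRECONDITION & SPEC =====
-- Pre_ excludes size ≥ 27, where Python A (and Python B) raise IndexError on alpha[i]
def Pre_draw_rangoli (size : Int) : Prop := size ≤ 26
instance (size : Int) : Decidable (Pre_draw_rangoli size) := by unfold Pre_draw_rangoli; infer_instance
def pvWitness_draw_rangoli : Int := (4)
def Spec_draw_rangoli (size : Int) (out : String) : Prop := out = draw_rangoli_alt size
instance (size : Int) (out : String) : Decidable (Spec_draw_rangoli size out) := by unfold Spec_draw_rangoli; infer_instance

-- ===== CLAIM (what is proved, stated in full; the proofs are below) =====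
def Claim_equal_draw_rangoli : Prop := ∀ (size : Int), Dom_draw_rangoli size → Pre_draw_rangoli size → Spec_draw_rangoli size (draw_rangoli size)

-- ===== LEMMAS AND PROOFS =====
theorem pvLines_nonpos (size : Int) (h : size ≤ 0) : pvLinesA size = pvLinesB size := by
  unfold pvLinesA pvLinesB
  rw [PySem.List.pyRange_one_eq_nil h, PySem.List.pyRange_one_eq_nil (by omega : 2 * size - 1 ≤ 0)]
  simp [PySem.List.slice?_none_none_neg_one, PySem.List.slice, PySem.Chars.join]

set_option maxRecDepth 100000 in
set_option maxHeartbeats 1600000 in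
theorem pvLines_pos (k : Nat) (hk : k < 26) : pvLinesA ((k : Int) + 1) = pvLinesB ((k : Int) + 1) := by
  have h : ((List.range 26).all fun k => pvLinesA ((k : Int) + 1) == pvLinesB ((k : Int) + 1)) = true := by
    decide
  exact eq_of_beq (List.all_eq_true.mp h k (List.mem_range.mpr hk))

-- ===== VERDICT (by name: the statement is the Claim_ definition above) =====
theorem draw_rangoli_spec : Claim_equal_draw_rangoli := by
  intro size _ hpre
  have h26 : size ≤ 26 := hpre
  unfold Spec_draw_rangoli draw_rangoli draw_rangoli_alt
  refine congrArg String.ofList ?_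
  by_cases h0 : size ≤ 0
  · exact pvLines_nonpos size h0
  · have hk : (size - 1).toNat < 26 := by omega
    have he : ((size - 1).toNat : Int) + 1 = size := by omega
    have := pvLines_pos (size - 1).toNat hk
    rwa [he] at this
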